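-- pv_equiv track=rewrite | github.com/minhnguyen200703/CapstoneProject_ADSSystem | Algorithm/optimized_matching.py | find_all_potential_plans
-- ===== SOURCE A (Python) =====
-- def find_all_potential_plans(nearest_trucks_containers, taskjobs, trucks, containers, graph):
--     # Recursive function to explore all combinations of task job assignments
--     def branch(node, taskjob_ids, current_assignments):
--         # If all task jobs are assigned, return the current valid assignments
--         if len(node) == len(taskjob_ids):
--             return [current_assignments]
--
--         # Get the next task job to process
--         current_taskjob = taskjob_ids[len(node)]
--         # Get the best available options for that task job
--         best_options = nearest_trucks_containers[current_taskjob]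
--
--         result = []
--         # Try each option (truck and container) for the current task job
--         for idx, (truck_id, _, container_id) in enumerate(best_options):
--             # Check if the truck or container is already assigned
--             if truck_id in [v[0] for v in current_assignments.values()] or \
--                (container_id and container_id in [v[1] for v in current_assignments.values()]):
--                 # Skip if the truck or container is already used
--                 continue
--             # Make a copy of current assignments and add the new assignment
--             new_assignments = current_assignments.copy()
--             new_assignments[current_taskjob] = (truck_id, container_id)
--             # Branch to the next task job
--             result.extend(branch(node + [idx], taskjob_ids, new_assignments))
--
--         return result
--
--     # Get the list of task job IDs to process
--     taskjob_ids = list(nearest_trucks_containers.keys())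
--     # Start branching to resolve conflicts and find valid assignment plans
--     all_potential_plans = branch([], taskjob_ids, {})
--     return all_potential_plans
-- ===== SOURCE B (Python) =====
-- def find_all_potential_plans(nearest_trucks_containers, taskjobs, trucks, containers, graph):
--     # Iterative layered build: extend every partial plan by each non-conflicting
--     # option of the current job, one job at a time (same order as the DFS).
--     plans = [{}]
--     for job, options in nearest_trucks_containers.items():
--         plans = [
--             {**plan, job: (truck_id, container_id)}
--             for plan in plans
--             for (truck_id, _, container_id) in options
--             if truck_id not in [v[0] for v in plan.values()]
--                and not (container_id and container_id in [v[1] for v in plan.values()])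
--         ]
--     return plans
-- ===== Notes on version B (the rewrite author's own statement) =====
-- stated objective: simpler
-- what changed: Replaced the recursive DFS helper `branch` (index-tracking node list, per-call result accumulation) with an iterative breadth-layered build: start from [{}] and, for each job in order, rebuild the plan list with a single comprehension extending every partial plan by each non-conflicting option; same lexicographic output order.
import Mathlib
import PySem

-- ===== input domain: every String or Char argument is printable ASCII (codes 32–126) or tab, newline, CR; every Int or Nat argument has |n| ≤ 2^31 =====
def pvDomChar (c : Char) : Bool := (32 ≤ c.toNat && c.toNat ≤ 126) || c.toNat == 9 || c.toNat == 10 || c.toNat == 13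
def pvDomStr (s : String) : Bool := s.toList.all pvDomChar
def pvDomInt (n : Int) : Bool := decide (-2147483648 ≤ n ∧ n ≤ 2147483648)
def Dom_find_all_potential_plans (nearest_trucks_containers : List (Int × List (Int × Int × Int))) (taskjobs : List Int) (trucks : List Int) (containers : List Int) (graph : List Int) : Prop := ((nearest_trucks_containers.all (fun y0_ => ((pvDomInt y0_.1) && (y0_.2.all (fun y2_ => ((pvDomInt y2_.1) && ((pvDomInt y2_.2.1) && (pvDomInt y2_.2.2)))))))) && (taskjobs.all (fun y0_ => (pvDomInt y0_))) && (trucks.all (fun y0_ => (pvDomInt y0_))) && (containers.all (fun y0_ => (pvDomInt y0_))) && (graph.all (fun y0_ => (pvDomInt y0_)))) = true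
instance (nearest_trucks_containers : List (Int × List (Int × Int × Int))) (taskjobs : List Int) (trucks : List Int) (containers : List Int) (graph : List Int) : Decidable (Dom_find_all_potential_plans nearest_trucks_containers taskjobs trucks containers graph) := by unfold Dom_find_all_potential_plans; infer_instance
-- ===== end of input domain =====

-- B replaces A's recursive DFS helper with an iterative layered rebuild of the plan list
-- (one pass per job, comprehension-style extension); same output, simpler decomposition.


-- ===== PORT A =====
-- nearest_trucks_containers[j]; keys from the dict itself are always present, so .getD [] is exact
def pvLookupA (d : List (Int × List (Int × Int × Int))) (j : Int) : List (Int × Int × Int) :=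
  (PySem.Dict.get? (PySem.Dict.mk d) j).getD []

-- recursive helper `branch`: `node` is only used for its length (the position in taskjob_ids),
-- so the recursion is on the list of remaining job ids; dict `current_assignments` is an
-- assoc list (job, truck, container) — the assigned job is always fresh, so `[k] = v` appends.
def branchA (d : List (Int × List (Int × Int × Int))) :
    List Int → List (Int × Int × Int) → List (List (Int × Int × Int))
  | [], asg => [asg]
  | j :: rest, asg =>
      (pvLookupA d j).foldl
        (fun res opt =>
          if opt.1 ∈ asg.map (fun v => v.2.1) ∨ (opt.2.2 ≠ 0 ∧ opt.2.2 ∈ asg.map (fun v => v.2.2)) then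
            res
          else
            res ++ branchA d rest (asg ++ [(j, opt.1, opt.2.2)]))
        []

def find_all_potential_plans (nearest_trucks_containers : List (Int × List (Int × Int × Int))) (taskjobs : List Int) (trucks : List Int) (containers : List Int) (graph : List Int) : List (List (Int × Int × Int)) :=
  branchA nearest_trucks_containers (PySem.Dict.keys (PySem.Dict.mk nearest_trucks_containers)) []

-- ===== PORT B =====
-- the inner comprehension of Source B: all non-conflicting one-option extensions of one plan
def extendPlanB (j : Int) (opts : List (Int × Int × Int)) (plan : List (Int × Int × Int)) :
    List (List (Int × Int × Int)) :=
  opts.filterMap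
    (fun opt =>
      if opt.1 ∈ plan.map (fun v => v.2.1) ∨ (opt.2.2 ≠ 0 ∧ opt.2.2 ∈ plan.map (fun v => v.2.2)) then
        none
      else
        some (plan ++ [(j, opt.1, opt.2.2)]))

def find_all_potential_plans_alt (nearest_trucks_containers : List (Int × List (Int × Int × Int))) (taskjobs : List Int) (trucks : List Int) (containers : List Int) (graph : List Int) : List (List (Int × Int × Int)) :=
  (PySem.Dict.keys (PySem.Dict.mk nearest_trucks_containers)).foldl
    (fun plans j => plans.flatMap
      (extendPlanB j ((PySem.Dict.get? (PySem.Dict.mk nearest_trucks_containers) j).getD [])))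
    [[]]

-- ===== PRECONDITION & SPEC =====
def Spec_find_all_potential_plans (nearest_trucks_containers : List (Int × List (Int × Int × Int))) (taskjobs : List Int) (trucks : List Int) (containers : List Int) (graph : List Int) (out : List (List (Int × Int × Int))) : Prop := out = find_all_potential_plans_alt nearest_trucks_containers taskjobs trucks containers graph
instance (nearest_trucks_containers : List (Int × List (Int × Int × Int))) (taskjobs : List Int) (trucks : List Int) (containers : List Int) (graph : List Int) (out : List (List (Int × Int × Int))) : Decidable (Spec_find_all_potential_plans nearest_trucks_containers taskjobs trucks containers graph out) := by unfold Spec_find_all_potential_plans; infer_instance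

-- ===== CLAIM (what is proved, stated in full; the proofs are below) =====
def Claim_equal_find_all_potential_plans : Prop := ∀ (nearest_trucks_containers : List (Int × List (Int × Int × Int))) (taskjobs : List Int) (trucks : List Int) (containers : List Int) (graph : List Int), Dom_find_all_potential_plans nearest_trucks_containers taskjobs trucks containers graph → Spec_find_all_potential_plans nearest_trucks_containers taskjobs trucks containers graph (find_all_potential_plans nearest_trucks_containers taskjobs trucks containers graph)

-- ===== LEMMAS AND PROOFS =====

-- A's foldl over the options of one job is B's filterMap-then-recurse on that job.
theorem branchA_foldl_eq (d : List (Int × List (Int × Int × Int))) (j : Int)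
    (rest : List Int) (opts : List (Int × Int × Int))
    (acc : List (List (Int × Int × Int))) (asg : List (Int × Int × Int)) :
    opts.foldl
      (fun res opt =>
        if opt.1 ∈ asg.map (fun v => v.2.1) ∨ (opt.2.2 ≠ 0 ∧ opt.2.2 ∈ asg.map (fun v => v.2.2)) then
          res
        else
          res ++ branchA d rest (asg ++ [(j, opt.1, opt.2.2)]))
      acc
    = acc ++ (extendPlanB j opts asg).flatMap (branchA d rest) := by
  induction opts generalizing acc with
  | nil => simp [extendPlanB]
  | cons o os ih =>
      simp only [List.foldl_cons, extendPlanB]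
      by_cases h : o.1 ∈ asg.map (fun v => v.2.1) ∨ (o.2.2 ≠ 0 ∧ o.2.2 ∈ asg.map (fun v => v.2.2))
      · simp only [if_pos h]
        rw [ih]
        simp [extendPlanB, if_pos h]
      · simp only [if_neg h]
        rw [ih]
        simp [extendPlanB, if_neg h, List.append_assoc]

-- one DFS step equals one layered step followed by the rest of the DFS
theorem branchA_cons (d : List (Int × List (Int × Int × Int))) (j : Int)
    (rest : List Int) (asg : List (Int × Int × Int)) :
    branchA d (j :: rest) asg
      = (extendPlanB j (pvLookupA d j) asg).flatMap (branchA d rest) := by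
  simpa using branchA_foldl_eq d j rest (pvLookupA d j) [] asg

-- main invariant: flat-mapping the DFS over a layer of partial plans
-- equals running the layered build over the remaining jobs from that layer
theorem flatMap_branchA_eq_foldl (d : List (Int × List (Int × Int × Int))) :
    ∀ (jobs : List Int) (plans : List (List (Int × Int × Int))),
    plans.flatMap (branchA d jobs)
      = jobs.foldl (fun ps j => ps.flatMap (extendPlanB j (pvLookupA d j))) plans := by
  intro jobs
  induction jobs with
  | nil => intro plans; simp [branchA]
  | cons j rest ih =>
      intro plans
      simp only [List.foldl_cons]
      rw [← ih (plans.flatMap (extendPlanB j (pvLookupA d j)))]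
      rw [List.flatMap_assoc]
      apply List.flatMap_congr
      intro asg _
      exact branchA_cons d j rest asg

-- ===== VERDICT (by name: the statement is the Claim_ definition above) =====
theorem find_all_potential_plans_spec : Claim_equal_find_all_potential_plans := by
  intro d taskjobs trucks containers graph _
  unfold Spec_find_all_potential_plans find_all_potential_plans find_all_potential_plans_alt
  have h := flatMap_branchA_eq_foldl d (PySem.Dict.keys (PySem.Dict.mk d)) [[]]
  simp only [List.flatMap_cons, List.flatMap_nil, List.append_nil] at h
  exact h
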